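-- pv_equiv track=rewrite | github.com/oceanm7n/codeforces_training | solved_tasks/37A.py | solve
-- ===== SOURCE A (Python) =====
-- def solve(n, l):
--     res = {}
--     for i in l:
--         if i in res.keys():
--             res[i] += 1
--         else:
--             res[i] = 1
--     return (max(res.values()), len(res.keys()))
-- ===== SOURCE B (Python) =====
-- def solve(n, l):
--     s = sorted(l)
--     best = run = distinct = 0
--     prev = None
--     for x in s:
--         if x == prev:
--             run += 1
--         else:
--             run = 1
--             distinct += 1
--             prev = x
--         if run > best:
--             best = run
--     return (best, distinct)
-- ===== Notes on version B (the rewrite author's own statement) =====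
-- stated objective: alternative
-- what changed: Replaces the dict-counter loop by sorting a copy of the list and scanning it once, tracking the current run of equal elements, the best run (max frequency) and a distinct counter.
import Mathlib
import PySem

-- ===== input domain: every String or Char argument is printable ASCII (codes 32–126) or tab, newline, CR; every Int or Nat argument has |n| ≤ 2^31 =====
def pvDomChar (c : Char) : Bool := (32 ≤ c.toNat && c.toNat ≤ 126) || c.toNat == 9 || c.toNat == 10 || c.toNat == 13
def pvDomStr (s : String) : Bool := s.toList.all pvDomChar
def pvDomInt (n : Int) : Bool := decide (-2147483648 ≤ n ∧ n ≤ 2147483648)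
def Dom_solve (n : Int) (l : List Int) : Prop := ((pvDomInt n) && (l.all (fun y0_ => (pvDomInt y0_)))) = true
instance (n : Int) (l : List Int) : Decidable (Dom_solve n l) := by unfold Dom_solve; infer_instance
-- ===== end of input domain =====

-- B replaces A's dict-counter loop by sorting a copy of the list and scanning it once (run-length scan); an alternative algorithm of similar cost.

-- ===== PORT A =====
def solve (n : Int) (l : List Int) : Int × Int :=
  let res := l.foldl (fun d i =>
    if d.contains i then d.insert i (d.getD i 0 + 1) else d.insert i 1)
    (PySem.Dict.empty : PySem.Dict Int Int)
  -- max(res.values()) raises ValueError on an empty dict (l = []); Pre_solve excludes that, so the .getD 0 default is never used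
  ((PySem.List.max? res.values (fun y => y)).getD 0, (res.keys.length : Int))

-- ===== PORT B =====
-- one step of B's scan over the sorted list: state = (best, run, distinct, prev)
def solveAltStep (st : Int × Int × Int × Option Int) (x : Int) : Int × Int × Int × Option Int :=
  let best := st.1
  let run := st.2.1
  let distinct := st.2.2.1
  let prev := st.2.2.2
  if some x = prev then
    (if run + 1 > best then run + 1 else best, run + 1, distinct, prev)
  else
    (if 1 > best then 1 else best, 1, distinct + 1, some x)

def solve_alt (n : Int) (l : List Int) : Int × Int :=
  let s := PySem.List.sorted l (fun x => x) false
  let st := s.foldl solveAltStep (0, 0, 0, none)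
  (st.1, st.2.2.1)

-- ===== PRECONDITION & SPEC =====
-- Pre_ excludes only the empty list, on which A raises ValueError (max() of an empty sequence).
def Pre_solve (n : Int) (l : List Int) : Prop := l ≠ []
instance (n : Int) (l : List Int) : Decidable (Pre_solve n l) := by unfold Pre_solve; infer_instance

def pvWitness_solve : Int × List Int := (3, [1, 2, 2])

def Spec_solve (n : Int) (l : List Int) (out : Int × Int) : Prop := out = solve_alt n l
instance (n : Int) (l : List Int) (out : Int × Int) : Decidable (Spec_solve n l out) := by unfold Spec_solve; infer_instance

-- ===== CLAIM (what is proved, stated in full; the proofs are below) =====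
def Claim_equal_solve : Prop := ∀ (n : Int) (l : List Int), Dom_solve n l → Pre_solve n l → Spec_solve n l (solve n l)

-- ===== LEMMAS AND PROOFS =====

-- A's loop body is the counter step: the else-branch inserts 1 = getD+1 because getD is 0 on a missing key
lemma solve_fold_eq_counter (l : List Int) :
    l.foldl (fun d i => if d.contains i then d.insert i (d.getD i 0 + 1) else d.insert i 1)
      (PySem.Dict.empty : PySem.Dict Int Int)
    = PySem.Dict.counter l := by
  rw [← PySem.Dict.foldl_insert_getD_add_one_eq_counter]
  congr 1
  funext d i
  by_cases h : d.contains i = true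
  · simp [h]
  · have hg : d.getD i 0 = 0 := by
      simp only [Bool.not_eq_true] at h
      simp [PySem.Dict.getD, (PySem.Dict.get?_eq_none_iff_contains d i).2 h]
    simp [h, hg]

lemma dedup_append_singleton (p : List Int) (x : Int) :
    PySem.List.dedup (p ++ [x]) = if x ∈ p then PySem.List.dedup p else PySem.List.dedup p ++ [x] := by
  have hd : PySem.List.dedup (p ++ [x]) = PySem.Set.add (PySem.List.dedup p) x := by
    simp [PySem.List.dedup_eq_ofList, PySem.Set.ofList, List.foldl_append]
  rw [hd]
  simp [PySem.Set.add, PySem.Set.contains_eq_listContains]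

-- invariant of B's scan on a ≤-sorted list: prev is the last (and largest) element, run is its count,
-- distinct is the number of distinct values, and best is some value's count bounding every count
lemma scan_inv (s : List Int) (hs : s.Pairwise (· ≤ ·)) :
    s = [] ∨
    ∃ L best,
      s.getLast? = some L ∧ (∀ v ∈ s, v ≤ L) ∧
      s.foldl solveAltStep (0, 0, 0, none)
        = (best, (s.count L : Int), ((PySem.List.dedup s).length : Int), some L) ∧
      (∃ v ∈ s, (s.count v : Int) = best) ∧ (∀ v ∈ s, (s.count v : Int) ≤ best) := by
  induction s using List.reverseRecOn with
  | nil => exact Or.inl rfl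
  | append_singleton p x ih =>
    right
    rw [List.pairwise_append] at hs
    obtain ⟨hp, -, hle⟩ := hs
    have hlex : ∀ a ∈ p, a ≤ x := fun a ha => hle a ha x (by simp)
    rcases ih hp with rfl | ⟨L, best, hL, hmax, hfold, ⟨v, hv, hvb⟩, hub⟩
    · refine ⟨x, 1, by simp, by simp, ?_, ⟨x, by simp⟩, by simp⟩
      simp [solveAltStep, PySem.Set.ofList, PySem.Set.add, PySem.Set.empty_eq, PySem.Set.contains_eq_listContains]
    · have hLmem : L ∈ p := List.mem_of_getLast? hL
      have hfold' : (p ++ [x]).foldl solveAltStep (0, 0, 0, none)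
          = solveAltStep (best, (p.count L : Int), ((PySem.List.dedup p).length : Int), some L) x := by
        rw [List.foldl_append, hfold]; rfl
      by_cases hxL : x = L
      · subst hxL
        have hstep : solveAltStep (best, (p.count x : Int), ((PySem.List.dedup p).length : Int), some x) x
            = (if (p.count x : Int) + 1 > best then (p.count x : Int) + 1 else best,
               (p.count x : Int) + 1, ((PySem.List.dedup p).length : Int), some x) := by
          simp [solveAltStep]
        refine ⟨x, if (p.count x : Int) + 1 > best then (p.count x : Int) + 1 else best,
          by simp, ?_, ?_, ?_, ?_⟩
        · intro v hv'; rcases List.mem_append.1 hv' with h | h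
          · exact hmax v h
          · simp at h; omega
        · rw [hfold', hstep, dedup_append_singleton, if_pos hLmem]
          simp [List.count_append]
        · by_cases hgt : (p.count x : Int) + 1 > best
          · exact ⟨x, by simp, by simp [List.count_append]; push_cast; omega⟩
          · refine ⟨v, by simp [hv], ?_⟩
            have hvx : v ≠ x := by
              intro rfl'; subst rfl'
              have := hub v hv
              omega
            simp [List.count_append, List.count_singleton', if_neg hgt]
            omega
        · intro w hw
          rcases List.mem_append.1 hw with h | h
          · by_cases hwx : w = x
            · subst hwx
              simp [List.count_append]
              split <;> push_cast <;> omega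
            · have := hub w h
              simp [List.count_append, List.count_singleton', hwx]
              split <;> omega
          · simp at h; subst h
            simp [List.count_append]
            split <;> push_cast <;> omega
      · have hLx : L ≤ x := hlex L hLmem
        have hxp : x ∉ p := fun hmem => hxL (le_antisymm (hmax x hmem) hLx)
        have hstep : solveAltStep (best, (p.count L : Int), ((PySem.List.dedup p).length : Int), some L) x
            = (if 1 > best then 1 else best, 1, ((PySem.List.dedup p).length : Int) + 1, some x) := by
          simp [solveAltStep, hxL]
        have hbest1 : (1 : Int) ≤ best := by
          have hc : 1 ≤ p.count v := List.one_le_count_iff.2 hv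
          omega
        refine ⟨x, best, by simp, ?_, ?_, ?_, ?_⟩
        · intro w hw; rcases List.mem_append.1 hw with h | h
          · exact le_trans (hmax w h) hLx
          · simp at h; omega
        · rw [hfold', hstep, dedup_append_singleton, if_neg hxp]
          have : ¬ (1 : Int) > best := by omega
          simp [this, List.count_append, List.count_singleton', List.count_eq_zero.mpr hxp]
        · refine ⟨v, by simp [hv], ?_⟩
          have hvx : v ≠ x := fun h => hxp (h ▸ hv)
          simp [List.count_append, List.count_singleton', hvb]
          omega
        · intro w hw
          rcases List.mem_append.1 hw with h | h
          · have hwx : w ≠ x := fun h' => hxp (h' ▸ h)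
            have := hub w h
            simp [List.count_append, List.count_singleton', hwx]
            omega
          · simp at h; subst h
            simp [List.count_append, List.count_eq_zero.mpr hxp]
            omega

-- permutations have the same number of distinct values
lemma dedup_length_perm (s l : List Int) (h : s.Perm l) :
    (PySem.List.dedup s).length = (PySem.List.dedup l).length := by
  have h1 : (PySem.List.dedup s).toFinset = s.toFinset := by
    ext a; simp
  have h2 : (PySem.List.dedup l).toFinset = l.toFinset := by
    ext a; simp
  have h3 := List.toFinset_eq_of_perm s l h
  have c1 := List.toFinset_card_of_nodup (PySem.List.nodup_dedup (xs := s))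
  have c2 := List.toFinset_card_of_nodup (PySem.List.nodup_dedup (xs := l))
  rw [← c1, ← c2, h1, h2, h3]

lemma solve_eq_alt (n : Int) (l : List Int) (hpre : l ≠ []) : solve n l = solve_alt n l := by
  -- A's dict is the counter: its values are the counts of the distinct values, its keys the distinct values
  have hA : solve n l
      = ((PySem.List.max? ((PySem.List.dedup l).map (fun v => (l.count v : Int))) (fun y => y)).getD 0,
         ((PySem.List.dedup l).length : Int)) := by
    simp only [solve, solve_fold_eq_counter]
    congr 2
    · simp [PySem.Dict.values, PySem.Dict.items_counter, List.map_map, Function.comp_def]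
    · simp [PySem.Dict.keys_counter]
  set s := PySem.List.sorted l (fun x => x) false with hsdef
  have hperm : s.Perm l := PySem.List.sorted_perm l (fun x => x) false
  have hsne : s ≠ [] := by
    intro h; apply hpre
    have := hperm.length_eq; rw [h] at this; simpa using (List.length_eq_zero_iff.mp this.symm)
  have hs : s.Pairwise (· ≤ ·) := by
    have := PySem.List.sorted_pairwise l (fun x => x)
    simpa using this
  rcases scan_inv s hs with h | ⟨L, best, hL, hmax, hfold, ⟨w, hw, hwb⟩, hub⟩
  · exact absurd h hsne
  have hB : solve_alt n l = (best, ((PySem.List.dedup s).length : Int)) := by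
    simp only [solve_alt, ← hsdef, hfold]
  rw [hA, hB]
  have hlen := dedup_length_perm s l hperm
  have hdne : (PySem.List.dedup l).map (fun v => (l.count v : Int)) ≠ [] := by
    rcases l with _ | ⟨a, t⟩
    · exact absurd rfl hpre
    · have : a ∈ PySem.List.dedup (a :: t) := (PySem.List.mem_dedup ..).2 (by simp)
      intro h
      rcases List.map_eq_nil_iff.mp h with h'
      rw [h'] at this; simp at this
  obtain ⟨m, hm⟩ : ∃ m, PySem.List.max? ((PySem.List.dedup l).map (fun v => (l.count v : Int))) (fun y => y) = some m := by
    rcases h : PySem.List.max? ((PySem.List.dedup l).map (fun v => (l.count v : Int))) (fun y => y) with _ | m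
    · exact absurd ((PySem.List.max?_eq_none_iff ..).mp h) hdne
    · exact ⟨m, rfl⟩
  have hmmem := PySem.List.max?_mem hm
  have hmub := PySem.List.max?_isMax hm
  obtain ⟨v, hv, hvm⟩ := List.mem_map.mp hmmem
  have hv' : v ∈ l := (PySem.List.mem_dedup ..).1 hv
  have h1 : m ≤ best := by
    have hvs : v ∈ s := hperm.mem_iff.mpr hv'
    have := hub v hvs
    rw [hperm.count_eq] at this
    omega
  have h2 : best ≤ m := by
    have hwl : w ∈ l := hperm.mem_iff.mp hw
    have hwd : w ∈ PySem.List.dedup l := (PySem.List.mem_dedup ..).2 hwl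
    have := hmub _ (List.mem_map.mpr ⟨w, hwd, rfl⟩)
    rw [hperm.count_eq] at hwb
    omega
  rw [hm]
  simp only [Option.getD_some]
  have hmb : m = best := le_antisymm h1 h2
  rw [hmb, hlen]

-- ===== VERDICT (by name: the statement is the Claim_ definition above) =====
theorem solve_spec : Claim_equal_solve := by
  intro n l _ hpre
  show solve n l = solve_alt n l
  exact solve_eq_alt n l hpre
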